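-- pv_equiv track=rewrite | github.com/Glumgam/agent | fallback/fallback_helpers.py | _last_run_command_index
-- ===== SOURCE A (Python) =====
-- from typing import Dict, List, Optional
--
-- def _last_run_command_index(history: List[Dict], needle: str) -> int:
--     for i in range(len(history) - 1, -1, -1):
--         action = history[i].get("action", {})
--         if action.get("tool") != "run":
--             continue
--         cmd = str(action.get("command", ""))
--         if needle in cmd:
--             return i
--     return -1
-- ===== SOURCE B (Python) =====
-- def _last_run_command_index(history, needle):
--     matches = [i for i, entry in enumerate(history)
--                if entry.get("action", {}).get("tool") == "run"
--                and needle in str(entry.get("action", {}).get("command", ""))]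
--     return matches[-1] if matches else -1
-- ===== Notes on version B (the rewrite author's own statement) =====
-- stated objective: alternative
-- what changed: Replaces the backward early-return scan with a two-stage computation: a forward comprehension collects all matching indices, then the last element of that list (or -1 if empty) is returned.
import Mathlib
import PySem

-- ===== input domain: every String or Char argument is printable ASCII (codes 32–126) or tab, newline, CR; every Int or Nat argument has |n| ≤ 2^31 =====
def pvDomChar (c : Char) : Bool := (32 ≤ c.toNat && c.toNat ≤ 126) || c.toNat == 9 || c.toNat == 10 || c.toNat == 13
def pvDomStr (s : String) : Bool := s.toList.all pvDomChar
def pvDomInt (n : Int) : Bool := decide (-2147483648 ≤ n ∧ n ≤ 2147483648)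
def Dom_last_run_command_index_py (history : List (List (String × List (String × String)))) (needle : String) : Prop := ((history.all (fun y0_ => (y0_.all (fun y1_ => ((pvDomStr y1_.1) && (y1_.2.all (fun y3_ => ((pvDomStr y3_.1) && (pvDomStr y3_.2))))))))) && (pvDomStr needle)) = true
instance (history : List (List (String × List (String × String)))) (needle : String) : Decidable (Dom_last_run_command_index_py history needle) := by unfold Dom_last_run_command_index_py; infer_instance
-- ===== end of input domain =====

-- B replaces A's backward early-return scan by a two-stage pipeline: collect all matching
-- indices in a forward comprehension, then take the last one (or -1 if there is none).

-- ===== PORT A =====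
-- A's backward loop: recursion over the reversed history, index i counting down from len-1.
def pvLoopA (entries : List (List (String × List (String × String)))) (needle : String) (i : Int) : Int :=
  match entries with
  | [] => -1
  | e :: rest =>
    let action := (e.lookup "action").getD []
    if (action.lookup "tool" != some "run") then
      pvLoopA rest needle (i - 1)
    else
      let cmd := (action.lookup "command").getD ""   -- values are strings: str(...) is identity, default ""
      if PySem.Str.isIn needle cmd then i else pvLoopA rest needle (i - 1)

def last_run_command_index_py (history : List (List (String × List (String × String)))) (needle : String) : Int :=
  pvLoopA history.reverse needle ((history.length : Int) - 1)

-- ===== PORT B =====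
-- B's per-entry filter predicate of the comprehension.
def pvMatchB (needle : String) (p : Int × List (String × List (String × String))) : Bool :=
  let action := (p.2.lookup "action").getD []
  (action.lookup "tool" == some "run")
    && PySem.Str.isIn needle ((action.lookup "command").getD "")

def last_run_command_index_py_alt (history : List (List (String × List (String × String)))) (needle : String) : Int :=
  let ms := ((PySem.List.enumerate history).filter (pvMatchB needle)).map (fun p => p.1)
  match ms.getLast? with
  | some i => i
  | none => -1

-- ===== PRECONDITION & SPEC =====
def Spec_last_run_command_index_py (history : List (List (String × List (String × String)))) (needle : String) (out : Int) : Prop := out = last_run_command_index_py_alt history needle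
instance (history : List (List (String × List (String × String)))) (needle : String) (out : Int) : Decidable (Spec_last_run_command_index_py history needle out) := by unfold Spec_last_run_command_index_py; infer_instance

-- ===== CLAIM (what is proved, stated in full; the proofs are below) =====
def Claim_equal_last_run_command_index_py : Prop := ∀ (history : List (List (String × List (String × String)))) (needle : String), Dom_last_run_command_index_py history needle → Spec_last_run_command_index_py history needle (last_run_command_index_py history needle)

-- ===== LEMMAS AND PROOFS =====

theorem pvLoopA_cons (e : List (String × List (String × String)))
    (rest : List (List (String × List (String × String)))) (needle : String) (i : Int) :
    pvLoopA (e :: rest) needle i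
      = if pvMatchB needle (i, e) then i else pvLoopA rest needle (i - 1) := by
  by_cases h : ((e.lookup "action").getD []).lookup "tool" = some "run"
  · by_cases h2 : PySem.Str.isIn needle ((((e.lookup "action").getD []).lookup "command").getD "") = true
    · simp [pvLoopA, pvMatchB, h]
    · simp [pvLoopA, pvMatchB, h]
  · simp [pvLoopA, pvMatchB, h]

-- pvMatchB ignores the index component.
theorem pvMatchB_fst (needle : String) (i j : Int) (e : List (String × List (String × String))) :
    pvMatchB needle (i, e) = pvMatchB needle (j, e) := rfl

theorem pv_agree (history : List (List (String × List (String × String)))) (needle : String) :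
    pvLoopA history.reverse needle ((history.length : Int) - 1)
      = last_run_command_index_py_alt history needle := by
  induction history using List.reverseRecOn with
  | nil => simp [pvLoopA, last_run_command_index_py_alt, PySem.List.enumerate]
  | append_singleton l e ih =>
    rw [List.reverse_append]
    simp only [List.reverse_cons, List.reverse_nil, List.nil_append, List.cons_append,
      List.length_append, List.length_cons, List.length_nil]
    have hcast : ((l.length + (0 + 1) : Nat) : Int) - 1 = (l.length : Int) := by push_cast; ring
    rw [hcast, pvLoopA_cons]
    unfold last_run_command_index_py_alt
    rw [PySem.List.enumerate_append]
    simp only [PySem.List.enumerate_cons, PySem.List.enumerate_nil, List.filter_append,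
      List.map_append]
    by_cases h : pvMatchB needle ((0 + (l.length : Int), e)) = true
    · have h' : pvMatchB needle (((l.length : Int)), e) = true := by
        rw [pvMatchB_fst needle _ (0 + (l.length : Int))]; exact h
      simp [h', List.getLast?_append]
    · have h' : pvMatchB needle (((l.length : Int)), e) = false := by
        rw [pvMatchB_fst needle _ (0 + (l.length : Int))]; simpa using h
      simp only [h', Bool.false_eq_true, if_false, List.filter_cons, h, List.filter_nil,
        List.map_nil, List.append_nil]
      rw [ih]; unfold last_run_command_index_py_alt; rfl

-- ===== VERDICT (by name: the statement is the Claim_ definition above) =====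
theorem last_run_command_index_py_spec : Claim_equal_last_run_command_index_py := by
  intro history needle _
  unfold Spec_last_run_command_index_py last_run_command_index_py
  exact pv_agree history needle
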